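-- pv_equiv track=rewrite | github.com/Zhang-Henry/paper_collection | venue.py | group_venues
-- ===== SOURCE A (Python) =====
-- def group_venues(venues, bins):
--   def get_bins_dict():
--     bins_dict = {bin:[] for bin in bins}
--     return bins_dict
--
--   bins_dict = get_bins_dict()
--   for venue in venues:
--     for bin in bins:
--       if bin.lower() in venue.lower():
--         bins_dict[bin].append(venue)
--         break
--
--   return bins_dict
-- ===== SOURCE B (Python) =====
-- def group_venues(venues, bins):
--     # Map phase: lowercase each bin once, assign each venue its first matching
--     # bin (or None); group phase: one comprehension per distinct bin.
--     lowered = [b.lower() for b in bins]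
--     def first_bin(vl):
--         return next((b for b, bl in zip(bins, lowered) if bl in vl), None)
--     assign = [(first_bin(v.lower()), v) for v in venues]
--     out = {}
--     for b in bins:
--         if b not in out:
--             out[b] = [v for fb, v in assign if fb == b]
--     return out
-- ===== Notes on version B (the rewrite author's own statement) =====
-- stated objective: alternative
-- what changed: A mutates a pre-built dict inside a nested loop with break, re-lowercasing bins and venue on every inner iteration; B is a map-then-group pipeline: lowercase bins once, assign each venue its first matching bin in one map pass, then build each distinct bin's list by a comprehension over the assignments.
import Mathlib
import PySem

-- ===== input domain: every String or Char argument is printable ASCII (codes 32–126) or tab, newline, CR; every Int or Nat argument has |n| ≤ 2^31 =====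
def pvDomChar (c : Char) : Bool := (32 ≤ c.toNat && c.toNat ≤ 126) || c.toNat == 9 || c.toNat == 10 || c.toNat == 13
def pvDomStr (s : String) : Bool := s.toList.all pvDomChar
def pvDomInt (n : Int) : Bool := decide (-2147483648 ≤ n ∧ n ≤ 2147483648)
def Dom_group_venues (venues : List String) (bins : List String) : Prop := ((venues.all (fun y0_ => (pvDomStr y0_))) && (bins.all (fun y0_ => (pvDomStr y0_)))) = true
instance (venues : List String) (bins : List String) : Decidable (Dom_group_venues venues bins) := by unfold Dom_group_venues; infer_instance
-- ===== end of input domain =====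

-- B trades A's mutate-a-dict double loop (which lowercases bins V×B times) for a
-- map-then-group decomposition with bins lowercased once (objective: alternative).

-- ===== PORT A =====
-- inner 'for bin in bins: if bin.lower() in venue.lower(): bins_dict[bin].append(venue); break'
def pvA_inner (venue : String) (bins : List String) (d : PySem.Dict String (List String)) : PySem.Dict String (List String) :=
  match bins with
  | [] => d
  | bin :: rest =>
    if PySem.Str.isIn (PySem.Str.lower bin) (PySem.Str.lower venue)
    then d.modify bin [] (fun l => l ++ [venue])   -- key always present: bin ∈ bins = keys
    else pvA_inner venue rest d

def group_venues (venues : List String) (bins : List String) : List (String × List String) :=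
  let bins_dict := bins.foldl (fun d bin => d.insert bin []) PySem.Dict.empty
  (venues.foldl (fun d venue => pvA_inner venue bins d) bins_dict).items

-- ===== PORT B =====
-- first_bin: next((b for b, bl in zip(bins, lowered) if bl in vl), None)
def pvB_first (pairs : List (String × String)) (vl : String) : Option String :=
  match pairs with
  | [] => none
  | (b, bl) :: rest => if PySem.Str.isIn bl vl then some b else pvB_first rest vl

-- 'for b in bins: if b not in out: out[b] = [v for fb, v in assign if fb == b]'
def pvB_group (bins : List String) (seen : PySem.Set String) (assign : List (Option String × String)) : List (String × List String) :=
  match bins with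
  | [] => []
  | b :: rest =>
    if PySem.Set.contains seen b then pvB_group rest seen assign
    else (b, (assign.filter (fun p => p.1 == some b)).map (·.2)) :: pvB_group rest (PySem.Set.add seen b) assign

def group_venues_alt (venues : List String) (bins : List String) : List (String × List String) :=
  let lowered := bins.map PySem.Str.lower
  let assign := venues.map (fun v => (pvB_first (bins.zip lowered) (PySem.Str.lower v), v))
  pvB_group bins PySem.Set.empty assign

-- ===== PRECONDITION & SPEC =====
def Spec_group_venues (venues : List String) (bins : List String) (out : List (String × List String)) : Prop := out = group_venues_alt venues bins
instance (venues : List String) (bins : List String) (out : List (String × List String)) : Decidable (Spec_group_venues venues bins out) := by unfold Spec_group_venues; infer_instance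

-- ===== CLAIM (what is proved, stated in full; the proofs are below) =====
def Claim_equal_group_venues : Prop := ∀ (venues : List String) (bins : List String), Dom_group_venues venues bins → Spec_group_venues venues bins (group_venues venues bins)

-- ===== LEMMAS AND PROOFS =====

-- the first matching bin of a venue, as B computes it (proof-side abbreviation)
def pvF (bins : List String) (v : String) : Option String :=
  pvB_first (bins.zip (bins.map PySem.Str.lower)) (PySem.Str.lower v)

-- A's inner loop assigns the venue to its first matching bin (or leaves d alone)
theorem pvA_inner_eq (v : String) : ∀ (bs : List String) (d : PySem.Dict String (List String)),
    pvA_inner v bs d =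
      match pvF bs v with
      | none => d
      | some b => d.modify b [] (fun l => l ++ [v]) := by
  intro bs
  induction bs with
  | nil => intro d; rfl
  | cons b rest ih =>
    intro d
    simp only [pvA_inner, pvF, List.map_cons, List.zip_cons_cons, pvB_first]
    by_cases h : PySem.Str.isIn (PySem.Str.lower b) (PySem.Str.lower v) = true
    · rw [if_pos h, if_pos h]
    · rw [if_neg h, if_neg h]; exact ih d

theorem pvB_first_mem : ∀ (pairs : List (String × String)) (vl : String) (b : String),
    pvB_first pairs vl = some b → b ∈ pairs.map Prod.fst := by
  intro pairs
  induction pairs with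
  | nil => intro vl b h; simp [pvB_first] at h
  | cons p rest ih =>
    intro vl b h
    obtain ⟨pb, pl⟩ := p
    simp only [pvB_first] at h
    by_cases hc : PySem.Str.isIn pl vl = true
    · rw [if_pos hc, Option.some_inj] at h
      simp [h]
    · rw [if_neg hc] at h
      simp only [List.map_cons, List.mem_cons]
      exact Or.inr (ih vl b h)

theorem pvF_mem (bins : List String) (v b : String) (h : pvF bins v = some b) : b ∈ bins := by
  have := pvB_first_mem _ _ _ h
  rwa [List.map_fst_zip (by simp)] at this

theorem keys_fold (bins : List String) : ∀ (vs : List String) (d : PySem.Dict String (List String)),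
    (∀ b ∈ bins, b ∈ d.keys) →
    (vs.foldl (fun d v => pvA_inner v bins d) d).keys = d.keys := by
  intro vs
  induction vs with
  | nil => intro d _; rfl
  | cons v vs ih =>
    intro d hd
    rw [List.foldl_cons, pvA_inner_eq v bins d]
    cases hf : pvF bins v with
    | none => exact ih d hd
    | some b =>
      have hb : d.contains b = true :=
        (PySem.Dict.contains_iff_mem_keys d b).mpr (hd b (pvF_mem bins v b hf))
      have hk : (d.modify b [] (fun l => l ++ [v])).keys = d.keys := by
        rw [PySem.Dict.keys_modify, PySem.Dict.keys_insert_of_contains d _ hb]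
      exact (ih _ (by rw [hk]; exact hd)).trans hk

theorem getD_fold (bins : List String) : ∀ (vs : List String) (d : PySem.Dict String (List String)) (k : String),
    (vs.foldl (fun d v => pvA_inner v bins d) d).getD k [] =
      d.getD k [] ++ vs.filter (fun v => pvF bins v == some k) := by
  intro vs
  induction vs with
  | nil => intro d k; simp
  | cons v vs ih =>
    intro d k
    rw [List.foldl_cons, pvA_inner_eq v bins d, List.filter_cons]
    cases hf : pvF bins v with
    | none => refine (ih d k).trans ?_; simp
    | some b =>
      have h1 := ih (d.modify b [] (fun l => l ++ [v])) k
      rw [PySem.Dict.getD_modify] at h1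
      refine Eq.trans h1 ?_
      by_cases hkb : k = b
      · subst hkb; simp
      · simp [hkb, Ne.symm hkb]

theorem getD_init : ∀ (bs : List String) (d : PySem.Dict String (List String)) (k : String),
    d.getD k [] = [] → (bs.foldl (fun d b => d.insert b []) d).getD k [] = [] := by
  intro bs
  induction bs with
  | nil => intro d k h; exact h
  | cons b rest ih =>
    intro d k h
    refine ih _ _ ?_
    rw [PySem.Dict.getD_insert]
    split <;> simp [h]

theorem A_characterization (venues bins : List String) :
    group_venues venues bins =
      (PySem.Set.ofList bins).map
        (fun b => (b, venues.filter (fun v => pvF bins v == some b))) := by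
  simp only [group_venues]
  have hkeys0 : (List.foldl (fun d bin => d.insert bin []) (PySem.Dict.empty : PySem.Dict String (List String)) bins).keys
      = PySem.Set.ofList bins := by
    rw [PySem.Dict.keys_foldl_insert bins (fun _ _ => ([] : List String)) PySem.Dict.empty]
    rfl
  have hnd0 : (List.foldl (fun d bin => d.insert bin []) (PySem.Dict.empty : PySem.Dict String (List String)) bins).keys.Nodup :=
    PySem.Dict.nodup_keys_foldl_insert bins (fun _ _ => ([] : List String)) _ PySem.Dict.nodup_keys_empty
  have hmem0 : ∀ b ∈ bins, b ∈ (List.foldl (fun d bin => d.insert bin []) (PySem.Dict.empty : PySem.Dict String (List String)) bins).keys := by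
    intro b hb; rw [hkeys0]; exact (PySem.Set.mem_ofList bins b).mpr hb
  have hkeys := keys_fold bins venues _ hmem0
  have hnd : (List.foldl (fun d v => pvA_inner v bins d)
      (List.foldl (fun d bin => d.insert bin []) (PySem.Dict.empty : PySem.Dict String (List String)) bins) venues).keys.Nodup := by
    rw [hkeys]; exact hnd0
  have hitems := PySem.Dict.items_eq_map_keys
    (List.foldl (fun d v => pvA_inner v bins d)
      (List.foldl (fun d bin => d.insert bin []) (PySem.Dict.empty : PySem.Dict String (List String)) bins) venues)
    hnd ([] : List String)
  rw [hitems, hkeys, hkeys0]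
  refine List.map_congr_left ?_
  intro b _
  rw [getD_fold bins venues _ b,
      getD_init bins PySem.Dict.empty b (PySem.Dict.getD_empty b [])]
  simp

-- the distinct elements of bs not already in seen, in first-occurrence order
def pvDedupFrom (bs : List String) (seen : PySem.Set String) : List String :=
  match bs with
  | [] => []
  | b :: rest =>
    if PySem.Set.contains seen b then pvDedupFrom rest seen
    else b :: pvDedupFrom rest (PySem.Set.add seen b)

theorem pvB_group_eq (assign : List (Option String × String)) :
    ∀ (bs : List String) (seen : PySem.Set String),
    pvB_group bs seen assign =
      (pvDedupFrom bs seen).map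
        (fun b => (b, (assign.filter (fun p => p.1 == some b)).map (fun p => p.2))) := by
  intro bs
  induction bs with
  | nil => intro seen; rfl
  | cons b rest ih =>
    intro seen
    simp only [pvB_group, pvDedupFrom]
    by_cases h : PySem.Set.contains seen b = true
    · rw [if_pos h, if_pos h, ih]
    · rw [if_neg h, if_neg h, ih, List.map_cons]

theorem dedupFrom_update : ∀ (bs : List String) (seen : PySem.Set String),
    seen ++ pvDedupFrom bs seen = PySem.Set.update seen bs := by
  intro bs
  induction bs with
  | nil => intro seen; simp [pvDedupFrom, PySem.Set.update]
  | cons b rest ih =>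
    intro seen
    have hstep : PySem.Set.update seen (b :: rest) = PySem.Set.update (PySem.Set.add seen b) rest := rfl
    by_cases h : PySem.Set.contains seen b = true
    · have hadd : PySem.Set.add seen b = seen := by unfold PySem.Set.add; rw [if_pos h]
      rw [hstep, hadd, pvDedupFrom, if_pos h, ih]
    · have hadd : PySem.Set.add seen b = seen ++ [b] := by unfold PySem.Set.add; rw [if_neg h]
      rw [hstep, pvDedupFrom, if_neg h, hadd, ← ih (seen ++ [b])]
      simp

theorem dedupFrom_nil (bs : List String) : pvDedupFrom bs PySem.Set.empty = PySem.Set.ofList bs := by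
  have h := dedupFrom_update bs PySem.Set.empty
  rw [show (PySem.Set.empty : PySem.Set String) = ([] : List String) from rfl] at h
  rw [List.nil_append] at h
  exact h

theorem B_characterization (venues bins : List String) :
    group_venues_alt venues bins =
      (PySem.Set.ofList bins).map
        (fun b => (b, venues.filter (fun v => pvF bins v == some b))) := by
  simp only [group_venues_alt]
  rw [pvB_group_eq, dedupFrom_nil]
  refine List.map_congr_left ?_
  intro b _
  rw [List.filter_map, List.map_map]
  have : ∀ v : String,
      ((fun p : Option String × String => p.1 == some b) ∘ fun v => (pvB_first (bins.zip (bins.map PySem.Str.lower)) (PySem.Str.lower v), v)) v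
        = (pvF bins v == some b) := fun v => rfl
  rw [List.filter_congr (fun v _ => this v)]
  exact congrArg (fun l => (b, l)) ((List.map_congr_left (fun v _ => rfl)).trans (List.map_id _))

-- ===== VERDICT (by name: the statement is the Claim_ definition above) =====
theorem group_venues_spec : Claim_equal_group_venues := by
  intro venues bins _
  unfold Spec_group_venues
  rw [A_characterization, B_characterization]
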